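-- pv_equiv track=rewrite | github.com/yourimlee/algorithm_practice | Programmers/더 맵게.py | solution
-- ===== SOURCE A (Python) =====
-- import heapq
--
-- def solution(scoville, K):
--     answer = 0
--     heapq.heapify(scoville)
--     while 1:
--         if len(scoville) <= 1 and scoville[0] < K:
--             answer = -1
--             break
--         if scoville[0] >= K:
--             break
--         new = heapq.heappop(scoville) + (heapq.heappop(scoville) * 2)
--         heapq.heappush(scoville, new)
--         answer +=1
--
--     return answer
-- ===== SOURCE B (Python) =====
-- def solution(scoville, K):
--     # Return value only: A heapifies/mutates its argument in place, B leaves it untouched.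
--     pool = list(scoville)
--     mixes = 0
--     while True:
--         best = second = None
--         for v in pool:
--             if best is None or v < best:
--                 best, second = v, best
--             elif second is None or v < second:
--                 second = v
--         if best >= K:
--             return mixes
--         if second is None:
--             return -1
--         pool.remove(best)
--         pool.remove(second)
--         pool.append(best + 2 * second)
--         mixes += 1
-- ===== Notes on version B (the rewrite author's own statement) =====
-- stated objective: alternative
-- what changed: Replaces the binary heap entirely by repeated selection over an unordered pool: each round one linear pass finds the two smallest values simultaneously, removes them by value and appends the mix, so no heap/sorted order is ever built or maintained; B also does not mutate its argument.
import Mathlib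
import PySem

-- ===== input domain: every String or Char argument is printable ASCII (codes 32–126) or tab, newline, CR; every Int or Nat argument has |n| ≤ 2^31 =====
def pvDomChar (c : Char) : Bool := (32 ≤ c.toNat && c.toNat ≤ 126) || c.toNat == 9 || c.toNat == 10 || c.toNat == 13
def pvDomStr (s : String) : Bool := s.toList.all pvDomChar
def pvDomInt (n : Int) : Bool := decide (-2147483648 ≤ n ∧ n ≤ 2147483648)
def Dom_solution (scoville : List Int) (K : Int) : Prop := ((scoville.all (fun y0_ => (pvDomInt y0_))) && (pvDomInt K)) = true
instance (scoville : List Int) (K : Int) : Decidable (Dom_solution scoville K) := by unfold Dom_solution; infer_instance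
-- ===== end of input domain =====

-- B drops A's binary heap (a hand-ported CPython heapq) altogether: each round one linear
-- scan finds the two smallest values, removes them by value and appends the mix; no order
-- is maintained. Equivalence is about the RETURN value only (A mutates its argument, B not).

-- ===== PORT A =====
-- heap[i] (heapq only indexes in range on admitted inputs; the default is never read)
def pyget (h : List Int) (i : Nat) : Int := h.getD i 0

-- heapq._siftdown(heap, startpos, pos): newitem is read once at entry, then the while
-- loop moves parents down until newitem's place is found (parentpos/parent inlined)
-- (the Nat fuel is a guard only: fuel = pos bounds the loop, whose position at least
-- halves each iteration; with fuel ≥ pos the 0-branch coincides with the loop exit)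
def siftdownLoop (fuel : Nat) (newitem : Int) (startpos : Nat) (heap : List Int) (pos : Nat) : List Int :=
  match fuel with
  | 0 => heap.set pos newitem
  | fuel + 1 =>
    if startpos < pos then
      if newitem < pyget heap ((pos - 1) / 2) then
        siftdownLoop fuel newitem startpos (heap.set pos (pyget heap ((pos - 1) / 2))) ((pos - 1) / 2)
      else heap.set pos newitem
    else heap.set pos newitem

def siftdownA (heap : List Int) (startpos pos : Nat) : List Int :=
  siftdownLoop pos (pyget heap pos) startpos heap pos

-- the childpos selection of heapq._siftup: the smaller child (right child on ties)
def siftupChild (endpos : Nat) (heap : List Int) (pos : Nat) : Nat :=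
  if 2 * pos + 2 < endpos ∧ ¬ (pyget heap (2 * pos + 1) < pyget heap (2 * pos + 2)) then
    2 * pos + 2
  else 2 * pos + 1

-- the while loop of heapq._siftup: bubble the hole at pos down to a leaf
-- (fuel guard: the hole position strictly increases, so fuel = endpos bounds the loop
-- and with fuel ≥ endpos - pos the 0-branch coincides with the loop exit)
def siftupLoop (fuel : Nat) (endpos : Nat) (heap : List Int) (pos : Nat) : List Int × Nat :=
  match fuel with
  | 0 => (heap, pos)
  | fuel + 1 =>
    if 2 * pos + 1 < endpos then
      siftupLoop fuel endpos (heap.set pos (pyget heap (siftupChild endpos heap pos)))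
        (siftupChild endpos heap pos)
    else (heap, pos)

-- heapq._siftup(heap, pos): endpos = len(heap), startpos = pos, newitem = heap[pos];
-- after the loop, heap[pos] = newitem and _siftdown(heap, startpos, pos)
def siftupA (heap : List Int) (pos : Nat) : List Int :=
  siftdownA
    ((siftupLoop heap.length heap.length heap pos).1.set (siftupLoop heap.length heap.length heap pos).2
      (pyget heap pos))
    pos (siftupLoop heap.length heap.length heap pos).2

-- heapq.heappush: append, then _siftdown(heap, 0, len(heap)-1)
def heappushA (heap : List Int) (item : Int) : List Int :=
  siftdownA (heap ++ [item]) 0 ((heap ++ [item]).length - 1)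

-- heapq.heappop: lastelt = heap.pop(); if heap: heap[0] = lastelt; _siftup(heap, 0)
-- (lastelt/rest inlined; list.pop() on an empty heap is unreachable under Pre_)
def heappopA (heap : List Int) : Int × List Int :=
  if heap.dropLast.isEmpty then (heap.getLastD 0, heap.dropLast)
  else (pyget heap.dropLast 0, siftupA (heap.dropLast.set 0 (heap.getLastD 0)) 0)

-- heapq.heapify: for i in reversed(range(n//2)): _siftup(heap, i)
def heapifyA (heap : List Int) : List Int :=
  ((List.range (heap.length / 2)).reverse).foldl (fun h i => siftupA h i) heap

-- A's 'while 1' loop (fuel guard: each mix shortens the heap by one, so fuel = the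
-- initial heap length suffices, proved in loopA_eq_loopC; the 0-branch is unreachable
-- from solution on inputs admitted by Pre_)
def loopA (K : Int) (fuel : Nat) (heap : List Int) (answer : Int) : Int :=
  match fuel with
  | 0 => 0
  | fuel + 1 =>
    if heap.length ≤ 1 ∧ pyget heap 0 < K then -1
    else if K ≤ pyget heap 0 then answer
    else
      loopA K fuel
        (heappushA (heappopA (heappopA heap).2).2
          ((heappopA heap).1 + (heappopA (heappopA heap).2).1 * 2))
        (answer + 1)

def solution (scoville : List Int) (K : Int) : Int :=
  loopA K scoville.length (heapifyA scoville) 0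

-- ===== PORT B =====
-- B's inner for loop body: the (best, second) update. The state (none, some _) never
-- arises (second is set only after best); the (none, _) branch is Python's
-- 'best, second = v, best' with best = None.
def scanStep (st : Option Int × Option Int) (v : Int) : Option Int × Option Int :=
  match st with
  | (none, _) => (some v, none)
  | (some b, none) => if v < b then (some v, some b) else (some b, some v)
  | (some b, some s) =>
      if v < b then (some v, some b)
      else if v < s then (some b, some v) else (some b, some s)

-- B's 'for v in pool' scan producing (best, second)
def scan2 (pool : List Int) : Option Int × Option Int :=
  pool.foldl scanStep (none, none)

-- B's 'while True' loop. The Nat parameter is a fuel guard only (Python's loop needs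
-- none): each mix shortens the pool by one, so fuel = the initial pool length suffices
-- (proved in loopB_eq_loopC); the fuel-0 and empty-pool branches are never reached from
-- solution_alt on inputs admitted by Pre_ (on [] Python raises TypeError).
def loopB (K : Int) (fuel : Nat) (pool : List Int) (mixes : Int) : Int :=
  match fuel with
  | 0 => 0
  | fuel + 1 =>
    match scan2 pool with
    | (none, _) => 0
    | (some b, s) =>
      if K ≤ b then mixes   -- 'if best >= K: return mixes'
      else
        match s with
        | none => -1
        | some s0 => loopB K fuel (((pool.erase b).erase s0) ++ [b + 2 * s0]) (mixes + 1)

def solution_alt (scoville : List Int) (K : Int) : Int :=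
  loopB K scoville.length scoville 0

-- ===== PRECONDITION & SPEC =====
-- Pre_ excludes only the empty list, on which A raises IndexError (scoville[0]).
def Pre_solution (scoville : List Int) (K : Int) : Prop := scoville ≠ []
instance (scoville : List Int) (K : Int) : Decidable (Pre_solution scoville K) := by
  unfold Pre_solution; infer_instance

def pvWitness_solution : List Int × Int := ([1, 2, 3, 9, 10, 12], 7)

def Spec_solution (scoville : List Int) (K : Int) (out : Int) : Prop := out = solution_alt scoville K
instance (scoville : List Int) (K : Int) (out : Int) : Decidable (Spec_solution scoville K out) := by
  unfold Spec_solution; infer_instance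

-- ===== CLAIM (what is proved, stated in full; the proofs are below) =====
def Claim_equal_solution : Prop := ∀ (scoville : List Int) (K : Int), Dom_solution scoville K → Pre_solution scoville K → Spec_solution scoville K (solution scoville K)

-- ===== LEMMAS AND PROOFS =====

theorem len_siftdownLoop (fuel : Nat) (newitem : Int) (startpos : Nat) (heap : List Int) (pos : Nat) :
    (siftdownLoop fuel newitem startpos heap pos).length = heap.length := by
  fun_induction siftdownLoop fuel newitem startpos heap pos <;> simp_all

theorem len_siftupLoop (fuel : Nat) (endpos : Nat) (heap : List Int) (pos : Nat) :
    (siftupLoop fuel endpos heap pos).1.length = heap.length := by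
  fun_induction siftupLoop fuel endpos heap pos <;> simp_all

theorem len_siftupA (heap : List Int) (pos : Nat) :
    (siftupA heap pos).length = heap.length := by
  simp [siftupA, siftdownA, len_siftdownLoop, len_siftupLoop]

theorem len_heappushA (heap : List Int) (item : Int) :
    (heappushA heap item).length = heap.length + 1 := by
  simp [heappushA, siftdownA, len_siftdownLoop]

theorem len_heappopA (heap : List Int) :
    (heappopA heap).2.length = heap.length - 1 := by
  rw [heappopA]
  split
  · simp
  · simp [len_siftupA]


-- ---- indexing helpers ----

theorem pyget_eq_getElem {h : List Int} {i : Nat} (hi : i < h.length) : pyget h i = h[i] := by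
  simp [pyget, List.getD_eq_getElem?_getD, List.getElem?_eq_getElem hi]

@[simp] theorem pyget_zero_cons (x : Int) (t : List Int) : pyget (x :: t) 0 = x := rfl
@[simp] theorem pyget_cons_succ (x : Int) (t : List Int) (n : Nat) :
    pyget (x :: t) (n + 1) = pyget t n := rfl
@[simp] theorem pyget_one_cons (x : Int) (t : List Int) : pyget (x :: t) 1 = pyget t 0 := rfl

theorem pyget_set_self {h : List Int} {i : Nat} (hi : i < h.length) (a : Int) :
    pyget (h.set i a) i = a := by
  rw [pyget_eq_getElem (by simpa using hi)]
  simp [List.getElem_set_self]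

theorem pyget_set_ne {h : List Int} {i j : Nat} (hne : i ≠ j) (a : Int) :
    pyget (h.set i a) j = pyget h j := by
  simp [pyget, List.getD_eq_getElem?_getD, List.getElem?_set_ne hne]

theorem pyget_mem {h : List Int} {i : Nat} (hi : i < h.length) : pyget h i ∈ h := by
  rw [pyget_eq_getElem hi]; exact List.getElem_mem hi

theorem pyget_dropLast {h : List Int} {i : Nat} (hi : i < h.length - 1) :
    pyget h.dropLast i = pyget h i := by
  rw [pyget_eq_getElem (by simpa using hi), pyget_eq_getElem (by omega)]
  simp [List.getElem_dropLast]

theorem pyget_append_left {h t : List Int} {i : Nat} (hi : i < h.length) :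
    pyget (h ++ t) i = pyget h i := by
  rw [pyget_eq_getElem (by simp; omega), pyget_eq_getElem hi]
  exact List.getElem_append_left hi

theorem pyget_concat (h : List Int) (v : Int) : pyget (h ++ [v]) h.length = v := by
  rw [pyget_eq_getElem (by simp)]
  simp

theorem set_pyget_self {h : List Int} {i : Nat} (hi : i < h.length) :
    h.set i (pyget h i) = h := by
  rw [pyget_eq_getElem hi]
  exact List.set_getElem_self hi

-- ---- multiset bookkeeping for in-place writes ----

theorem coe_cons (a : Int) (l : List Int) :
    ((a :: l : List Int) : Multiset Int) = (l : Multiset Int) + {a} := by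
  rw [← Multiset.cons_coe, ← Multiset.singleton_add]
  exact add_comm _ _

theorem mset_set : ∀ {h : List Int} {i : Nat}, i < h.length → ∀ (a : Int),
    ((h.set i a : List Int) : Multiset Int) + {pyget h i} = (h : Multiset Int) + {a} := by
  intro h
  induction h with
  | nil => intro i hi; simp at hi
  | cons x t ih =>
    intro i hi a
    cases i with
    | zero =>
      show ((a :: t : List Int) : Multiset Int) + {x} = _
      rw [coe_cons, coe_cons]
      exact add_right_comm _ _ _
    | succ n =>
      have hn : n < t.length := by simpa using hi
      show ((x :: t.set n a : List Int) : Multiset Int) + {pyget t n} = _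
      rw [coe_cons, coe_cons]
      calc ((t.set n a : List Int) : Multiset Int) + {x} + {pyget t n}
          = ((t.set n a : List Int) : Multiset Int) + {pyget t n} + {x} := add_right_comm _ _ _
        _ = (t : Multiset Int) + {a} + {x} := by rw [ih hn a]
        _ = (t : Multiset Int) + {x} + {a} := add_right_comm _ _ _

theorem perm_set_set {h : List Int} {i j : Nat} (hij : i ≠ j) (hi : i < h.length)
    (hj : j < h.length) (v : Int) :
    ((h.set i (pyget h j)).set j v).Perm (h.set i v) := by
  rw [← Multiset.coe_eq_coe]
  have e1 := mset_set (show j < (h.set i (pyget h j)).length by simpa using hj) v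
  rw [pyget_set_ne hij] at e1
  have e2 := mset_set hi (pyget h j)
  have e3 := mset_set hi v
  have key : ((((h.set i (pyget h j)).set j v : List Int) : Multiset Int)) + ({pyget h j} + {pyget h i}) =
      ((h.set i v : List Int) : Multiset Int) + ({pyget h j} + {pyget h i}) := by
    calc (((h.set i (pyget h j)).set j v : List Int) : Multiset Int) + ({pyget h j} + {pyget h i})
        = ((((h.set i (pyget h j)).set j v : List Int) : Multiset Int) + {pyget h j}) + {pyget h i} := by
          rw [add_assoc]
      _ = (((h.set i (pyget h j)) : Multiset Int) + {v}) + {pyget h i} := by rw [e1]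
      _ = (((h.set i (pyget h j)) : Multiset Int) + {pyget h i}) + {v} := add_right_comm _ _ _
      _ = ((h : Multiset Int) + {pyget h j}) + {v} := by rw [e2]
      _ = ((h : Multiset Int) + {v}) + {pyget h j} := add_right_comm _ _ _
      _ = (((h.set i v) : Multiset Int) + {pyget h i}) + {pyget h j} := by rw [e3]
      _ = ((h.set i v : List Int) : Multiset Int) + ({pyget h j} + {pyget h i}) := by
          rw [add_assoc, add_comm {pyget h i} _]
  exact add_right_cancel key

-- ---- the subtree relation of the implicit binary tree (parent of i is (i-1)/2) ----

def desc (r i : Nat) : Bool :=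
  if i = r then true else if i ≤ r then false else desc r ((i - 1) / 2)
termination_by i
decreasing_by omega

def isChild (i c : Nat) : Prop := c = 2 * i + 1 ∨ c = 2 * i + 2

-- the heap property on the subtree rooted at r
def HeapAt (h : List Int) (r : Nat) : Prop :=
  ∀ i c, desc r i = true → isChild i c → c < h.length → pyget h i ≤ pyget h c

def IsHeap (h : List Int) : Prop := HeapAt h 0

theorem desc_refl (r : Nat) : desc r r = true := by rw [desc]; simp

theorem desc_le {i r : Nat} (h : desc r i = true) : r ≤ i := by
  rw [desc] at h
  split at h
  · omega
  · split at h
    · simp at h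
    · omega

theorem desc_parent {r i : Nat} (h : desc r i = true) (hne : i ≠ r) :
    desc r ((i - 1) / 2) = true ∧ r < i := by
  rw [desc, if_neg hne] at h
  split at h
  · simp at h
  · exact ⟨h, by omega⟩

theorem desc_of_parent {r i : Nat} (hlt : r < i) (h : desc r ((i - 1) / 2) = true) :
    desc r i = true := by
  rw [desc, if_neg (by omega), if_neg (by omega)]
  exact h

theorem desc_child {r i c : Nat} (h : desc r i = true) (hc : isChild i c) :
    desc r c = true := by
  have hr := desc_le h
  have h1 : (c - 1) / 2 = i := by rcases hc with h' | h' <;> omega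
  exact desc_of_parent (by rcases hc with h' | h' <;> omega) (h1 ▸ h)

theorem desc_zero : ∀ i : Nat, desc 0 i = true := by
  intro i
  induction i using Nat.strong_induction_on with
  | _ i ih =>
    rcases Nat.eq_zero_or_pos i with h | h
    · subst h; exact desc_refl 0
    · exact desc_of_parent h (ih _ (by omega))

theorem desc_trans : ∀ {i j k : Nat}, desc k j = true → desc j i = true → desc k i = true := by
  intro i
  induction i using Nat.strong_induction_on with
  | _ i ih =>
    intro j k hkj hji
    by_cases hij : i = j
    · subst hij; exact hkj
    · obtain ⟨hp, hlt⟩ := desc_parent hji hij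
      have := ih ((i - 1) / 2) (by omega) hkj hp
      have hki : k < i := by have := desc_le hkj; omega
      exact desc_of_parent hki this

theorem desc_step : ∀ {i r : Nat}, desc r i = true → i ≠ r →
    ∃ c, isChild r c ∧ desc c i = true := by
  intro i
  induction i using Nat.strong_induction_on with
  | _ i ih =>
    intro r h hne
    obtain ⟨hp, hlt⟩ := desc_parent h hne
    by_cases hpr : (i - 1) / 2 = r
    · refine ⟨i, ?_, desc_refl i⟩
      unfold isChild; omega
    · obtain ⟨c, hc, hdc⟩ := ih _ (by omega) hp hpr
      have hcle := desc_le hdc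
      exact ⟨c, hc, desc_of_parent (by omega) hdc⟩

theorem desc_tree : ∀ {k i j : Nat}, desc i k = true → desc j k = true →
    desc i j = true ∨ desc j i = true := by
  intro k
  induction k using Nat.strong_induction_on with
  | _ k ih =>
    intro i j hik hjk
    by_cases hki : k = i
    · subst hki; right; exact hjk
    · by_cases hkj : k = j
      · subst hkj; left; exact hik
      · obtain ⟨hp, hlt⟩ := desc_parent hik hki
        obtain ⟨hq, _⟩ := desc_parent hjk hkj
        exact ih _ (by omega) hp hq

-- ---- correctness of _siftdown (bubble-up with a hole at pos) ----

theorem sdl_spec (newitem : Int) (p0 : Nat) :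
    ∀ (fuel pos : Nat) (heap : List Int),
    pos ≤ fuel → pos < heap.length → desc p0 pos = true →
    (∀ i c, desc p0 i = true → isChild i c → c < heap.length → i ≠ pos → c ≠ pos →
      pyget heap i ≤ pyget heap c) →
    (∀ c, isChild pos c → c < heap.length → newitem ≤ pyget heap c) →
    (pos ≠ p0 → ∀ c, isChild pos c → c < heap.length →
      pyget heap ((pos - 1) / 2) ≤ pyget heap c) →
    (siftdownLoop fuel newitem p0 heap pos).Perm (heap.set pos newitem) ∧
    (∀ j, desc p0 j = false → pyget (siftdownLoop fuel newitem p0 heap pos) j = pyget heap j) ∧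
    HeapAt (siftdownLoop fuel newitem p0 heap pos) p0 := by
  intro fuel
  induction fuel with
  | zero =>
    intro pos heap hf hlen hdesc hii hiii _
    have hpos0 : pos = 0 := by omega
    have hpe : pos = p0 := le_antisymm (by omega) (by have := desc_le hdesc; omega)
    rw [siftdownLoop]
    refine ⟨List.Perm.refl _, ?_, ?_⟩
    · intro j hdj
      have hne : pos ≠ j := by intro h; subst h; simp [hdesc] at hdj
      exact pyget_set_ne hne newitem
    · intro i c hdi hc hclen
      rw [List.length_set] at hclen
      have hilt : i < c := by rcases hc with h | h <;> omega
      by_cases hipos : i = pos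
      · subst hipos
        rw [pyget_set_self hlen, pyget_set_ne (show i ≠ c by omega)]
        exact hiii c hc hclen
      · by_cases hcpos : c = pos
        · exfalso
          have := desc_le hdi
          omega
        · rw [pyget_set_ne (show pos ≠ i from fun h => hipos h.symm),
            pyget_set_ne (show pos ≠ c from fun h => hcpos h.symm)]
          exact hii i c hdi hc hclen hipos hcpos
  | succ fuel ih =>
    intro pos heap hf hlen hdesc hii hiii hiv
    have terminal : (pos = p0 ∨ ¬ newitem < pyget heap ((pos - 1) / 2)) →
        (heap.set pos newitem).Perm (heap.set pos newitem) ∧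
        (∀ j, desc p0 j = false → pyget (heap.set pos newitem) j = pyget heap j) ∧
        HeapAt (heap.set pos newitem) p0 := by
      intro hterm
      refine ⟨List.Perm.refl _, ?_, ?_⟩
      · intro j hdj
        have hne : pos ≠ j := by intro h; subst h; simp [hdesc] at hdj
        exact pyget_set_ne hne newitem
      · intro i c hdi hc hclen
        rw [List.length_set] at hclen
        have hilt : i < c := by rcases hc with h | h <;> omega
        by_cases hipos : i = pos
        · subst hipos
          rw [pyget_set_self hlen, pyget_set_ne (show i ≠ c by omega)]
          exact hiii c hc hclen
        · by_cases hcpos : c = pos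
          · subst hcpos
            have hip : i = (c - 1) / 2 := by rcases hc with h | h <;> omega
            rw [pyget_set_ne (show c ≠ i by omega), pyget_set_self hlen]
            rcases hterm with hterm | hterm
            · exfalso
              have := desc_le hdi
              omega
            · rw [hip]
              omega
          · rw [pyget_set_ne (show pos ≠ i from fun h => hipos h.symm),
              pyget_set_ne (show pos ≠ c from fun h => hcpos h.symm)]
            exact hii i c hdi hc hclen hipos hcpos
    rw [siftdownLoop]
    by_cases hppos : p0 < pos
    · rw [if_pos hppos]
      by_cases hcmp : newitem < pyget heap ((pos - 1) / 2)
      · rw [if_pos hcmp]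
        have hple : (pos - 1) / 2 < pos := by omega
        obtain ⟨hdp, _⟩ := desc_parent hdesc (by omega)
        have hplen : (pos - 1) / 2 < (heap.set pos (pyget heap ((pos - 1) / 2))).length := by
          rw [List.length_set]; omega
        have hii' : ∀ i c, desc p0 i = true → isChild i c →
            c < (heap.set pos (pyget heap ((pos - 1) / 2))).length → i ≠ (pos - 1) / 2 →
            c ≠ (pos - 1) / 2 →
            pyget (heap.set pos (pyget heap ((pos - 1) / 2))) i ≤
              pyget (heap.set pos (pyget heap ((pos - 1) / 2))) c := by
          intro i c hdi hc hclen hip hcp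
          rw [List.length_set] at hclen
          by_cases hcpos : c = pos
          · subst hcpos
            have : i = (c - 1) / 2 := by rcases hc with h | h <;> omega
            exact absurd this hip
          · rw [pyget_set_ne (show pos ≠ c from fun h => hcpos h.symm)]
            by_cases hipos : i = pos
            · subst hipos
              rw [pyget_set_self hlen]
              exact hiv (by omega) c hc hclen
            · rw [pyget_set_ne (show pos ≠ i from fun h => hipos h.symm)]
              exact hii i c hdi hc hclen hipos hcpos
        have hiii' : ∀ c, isChild ((pos - 1) / 2) c →
            c < (heap.set pos (pyget heap ((pos - 1) / 2))).length →
            newitem ≤ pyget (heap.set pos (pyget heap ((pos - 1) / 2))) c := by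
          intro c hc hclen
          rw [List.length_set] at hclen
          by_cases hcpos : c = pos
          · subst hcpos; rw [pyget_set_self hlen]; exact le_of_lt hcmp
          · rw [pyget_set_ne (show pos ≠ c from fun h => hcpos h.symm)]
            have := hii ((pos - 1) / 2) c hdp hc hclen (by omega) hcpos
            omega
        have hiv' : (pos - 1) / 2 ≠ p0 → ∀ c, isChild ((pos - 1) / 2) c →
            c < (heap.set pos (pyget heap ((pos - 1) / 2))).length →
            pyget (heap.set pos (pyget heap ((pos - 1) / 2))) (((pos - 1) / 2 - 1) / 2) ≤
              pyget (heap.set pos (pyget heap ((pos - 1) / 2))) c := by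
          intro hppne c hc hclen
          rw [List.length_set] at hclen
          obtain ⟨hdgp, hplt⟩ := desc_parent hdp hppne
          have hgplt : ((pos - 1) / 2 - 1) / 2 < (pos - 1) / 2 := by omega
          rw [pyget_set_ne (show pos ≠ ((pos - 1) / 2 - 1) / 2 by omega)]
          have hgpar : pyget heap (((pos - 1) / 2 - 1) / 2) ≤ pyget heap ((pos - 1) / 2) :=
            hii _ _ hdgp (by unfold isChild; omega) (by omega) (by omega) (by omega)
          by_cases hcpos : c = pos
          · subst hcpos; rw [pyget_set_self hlen]; exact hgpar
          · rw [pyget_set_ne (show pos ≠ c from fun h => hcpos h.symm)]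
            have := hii ((pos - 1) / 2) c hdp hc hclen (by omega) hcpos
            omega
        obtain ⟨hperm, hunch, hheap⟩ := ih ((pos - 1) / 2) _ (by omega) hplen hdp hii' hiii' hiv'
        refine ⟨?_, ?_, hheap⟩
        · exact hperm.trans (perm_set_set (by omega) hlen (by omega) newitem)
        · intro j hdj
          have hne : pos ≠ j := by intro h; subst h; simp [hdesc] at hdj
          rw [hunch j hdj, pyget_set_ne hne]
      · rw [if_neg hcmp]
        exact terminal (Or.inr hcmp)
    · rw [if_neg hppos]
      have hpe : pos = p0 := le_antisymm (by omega) (desc_le hdesc)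
      exact terminal (Or.inl hpe)

-- ---- correctness of the _siftup while loop (bubble the hole down) ----

theorem sul_spec (endpos : Nat) :
    ∀ (fuel pos : Nat) (heap : List Int) (p0 : Nat),
    endpos - pos ≤ fuel → endpos = heap.length → pos < endpos → desc p0 pos = true →
    (∀ i c, desc p0 i = true → isChild i c → c < endpos → i ≠ pos → c ≠ pos →
      pyget heap i ≤ pyget heap c) →
    (pos ≠ p0 → ∀ c, isChild pos c → c < endpos →
      pyget heap ((pos - 1) / 2) ≤ pyget heap c) →
    (siftupLoop fuel endpos heap pos).2 < endpos ∧
    desc p0 (siftupLoop fuel endpos heap pos).2 = true ∧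
    ¬ (2 * (siftupLoop fuel endpos heap pos).2 + 1 < endpos) ∧
    (∀ v, ((siftupLoop fuel endpos heap pos).1.set (siftupLoop fuel endpos heap pos).2 v).Perm
      (heap.set pos v)) ∧
    (∀ j, desc p0 j = false → pyget (siftupLoop fuel endpos heap pos).1 j = pyget heap j) ∧
    (∀ i c, desc p0 i = true → isChild i c → c < endpos →
      i ≠ (siftupLoop fuel endpos heap pos).2 → c ≠ (siftupLoop fuel endpos heap pos).2 →
      pyget (siftupLoop fuel endpos heap pos).1 i ≤ pyget (siftupLoop fuel endpos heap pos).1 c) := by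
  intro fuel
  induction fuel with
  | zero =>
    intro pos heap p0 hf hend hlen hdesc hii hiv
    exact absurd hlen (by omega)
  | succ fuel ih =>
    intro pos heap p0 hf hend hlen hdesc hii hiv
    rw [siftupLoop]
    by_cases hch : 2 * pos + 1 < endpos
    · rw [if_pos hch]
      set c := siftupChild endpos heap pos with hcdef
      have hcchild : isChild pos c := by
        rw [hcdef]; unfold siftupChild; split
        · exact Or.inr rfl
        · exact Or.inl rfl
      have hclt : c < endpos := by
        rw [hcdef]; unfold siftupChild; split <;> omega
      have hcmin : ∀ d, isChild pos d → d < endpos → pyget heap c ≤ pyget heap d := by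
        intro d hd hdlt
        rw [hcdef]; unfold siftupChild; split
        · rename_i hcond
          rcases hd with h | h <;> subst h
          · omega
          · exact le_refl _
        · rename_i hcond
          rcases hd with h | h <;> subst h
          · exact le_refl _
          · have : pyget heap (2 * pos + 1) < pyget heap (2 * pos + 2) := by
              by_contra hnot; exact hcond ⟨hdlt, hnot⟩
            omega
      have hpos_c : pos < c := by rcases hcchild with h | h <;> omega
      have hposlen : pos < heap.length := by omega
      have hclen : c < heap.length := by omega
      have hplen' : c < (heap.set pos (pyget heap c)).length := by
        rw [List.length_set]; omega
      have hii' : ∀ i d, desc p0 i = true → isChild i d →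
          d < endpos → i ≠ c → d ≠ c →
          pyget (heap.set pos (pyget heap c)) i ≤ pyget (heap.set pos (pyget heap c)) d := by
        intro i d hdi hd hdlt hic hdc
        by_cases hdp : d = pos
        · subst hdp
          have hipar : i = (d - 1) / 2 := by rcases hd with h | h <;> omega
          have hipos : i ≠ d := by rcases hd with h | h <;> omega
          rw [pyget_set_ne (show d ≠ i from fun h => hipos h.symm), pyget_set_self hposlen]
          have hppne : d ≠ p0 := by
            intro h; subst h
            have := desc_le hdi
            rcases hd with h' | h' <;> omega
          rw [hipar]
          exact hiv hppne c hcchild hclt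
        · by_cases hip : i = pos
          · subst hip
            rw [pyget_set_self hposlen, pyget_set_ne (show i ≠ d from fun h => hdp h.symm)]
            exact hcmin d hd hdlt
          · rw [pyget_set_ne (show pos ≠ i from fun h => hip h.symm),
              pyget_set_ne (show pos ≠ d from fun h => hdp h.symm)]
            exact hii i d hdi hd hdlt hip hdp
      have hiv' : c ≠ p0 → ∀ d, isChild c d → d < endpos →
          pyget (heap.set pos (pyget heap c)) ((c - 1) / 2) ≤
            pyget (heap.set pos (pyget heap c)) d := by
        intro _ d hd hdlt
        have hparc : (c - 1) / 2 = pos := by rcases hcchild with h | h <;> omega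
        have hdne : d ≠ pos := by rcases hd with h | h <;> omega
        rw [hparc, pyget_set_self hposlen,
          pyget_set_ne (show pos ≠ d from fun h => hdne h.symm)]
        exact hii c d (desc_child hdesc hcchild) hd hdlt (by omega) hdne
      obtain ⟨g1, g2, g3, g4, g5, g6⟩ := ih c
        (heap.set pos (pyget heap c)) p0 (by omega) (by rw [List.length_set]; exact hend) hclt
        (desc_child hdesc hcchild) hii' hiv'
      refine ⟨g1, g2, g3, ?_, ?_, g6⟩
      · intro v
        exact (g4 v).trans (perm_set_set (by omega) hposlen hclen v)
      · intro j hdj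
        have hne : pos ≠ j := by intro h; subst h; simp [hdesc] at hdj
        rw [g5 j hdj, pyget_set_ne hne]
    · rw [if_neg hch]
      exact ⟨hlen, hdesc, hch, fun v => List.Perm.refl _, fun j _ => rfl,
        fun i d hdi hd hdlt hic hdc => hii i d hdi hd hdlt hic hdc⟩

-- ---- correctness of _siftup ----

theorem siftupA_spec (heap : List Int) (pos : Nat)
    (hlen : pos < heap.length)
    (hii : ∀ i c, desc pos i = true → isChild i c → c < heap.length → i ≠ pos →
      pyget heap i ≤ pyget heap c) :
    (siftupA heap pos).Perm heap ∧ HeapAt (siftupA heap pos) pos ∧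
    (∀ j, desc pos j = false → pyget (siftupA heap pos) j = pyget heap j) ∧
    (siftupA heap pos).length = heap.length := by
  obtain ⟨g1, g2, g3, g4, g5, g6⟩ := sul_spec heap.length heap.length pos heap pos (by omega) rfl hlen
    (desc_refl pos)
    (fun i c hdi hc hclen hip _ => hii i c hdi hc hclen hip)
    (fun h => absurd rfl h)
  have hr1len : (siftupLoop heap.length heap.length heap pos).1.length = heap.length :=
    len_siftupLoop _ _ _ _
  have hsetlen : (siftupLoop heap.length heap.length heap pos).2 <
      ((siftupLoop heap.length heap.length heap pos).1.set (siftupLoop heap.length heap.length heap pos).2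
        (pyget heap pos)).length := by
    rw [List.length_set, hr1len]; exact g1
  have hni : pyget ((siftupLoop heap.length heap.length heap pos).1.set
      (siftupLoop heap.length heap.length heap pos).2 (pyget heap pos))
      (siftupLoop heap.length heap.length heap pos).2 = pyget heap pos :=
    pyget_set_self (by rw [hr1len]; exact g1) _
  rw [siftupA, siftdownA, hni]
  obtain ⟨p1, p2, p3⟩ := sdl_spec (pyget heap pos) pos (siftupLoop heap.length heap.length heap pos).2
    (siftupLoop heap.length heap.length heap pos).2
    ((siftupLoop heap.length heap.length heap pos).1.set (siftupLoop heap.length heap.length heap pos).2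
      (pyget heap pos))
    le_rfl hsetlen g2
    (by
      intro i c hdi hc hclen hip hcp
      rw [List.length_set, hr1len] at hclen
      rw [pyget_set_ne (show (siftupLoop heap.length heap.length heap pos).2 ≠ i from fun h => hip h.symm),
        pyget_set_ne (show (siftupLoop heap.length heap.length heap pos).2 ≠ c from fun h => hcp h.symm)]
      exact g6 i c hdi hc hclen hip hcp)
    (by
      intro c hc hclen
      exfalso
      rw [List.length_set, hr1len] at hclen
      rcases hc with h | h <;> omega)
    (by
      intro _ c hc hclen
      exfalso
      rw [List.length_set, hr1len] at hclen
      rcases hc with h | h <;> omega)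
  refine ⟨?_, ?_, ?_, ?_⟩
  · rw [List.set_set] at p1
    refine p1.trans ?_
    exact (g4 (pyget heap pos)).trans (by rw [set_pyget_self hlen])
  · exact p3
  · intro j hdj
    have hne : (siftupLoop heap.length heap.length heap pos).2 ≠ j := by
      intro h; subst h; simp [g2] at hdj
    rw [p2 j hdj, pyget_set_ne hne, g5 j hdj]
  · rw [len_siftdownLoop, List.length_set, hr1len]

-- ---- heapify ----

theorem heapify_aux : ∀ (k : Nat) (heap : List Int), k ≤ heap.length / 2 →
    (∀ j, k ≤ j → HeapAt heap j) →
    (((List.range k).reverse.foldl (fun h i => siftupA h i) heap).Perm heap ∧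
    (∀ j, HeapAt ((List.range k).reverse.foldl (fun h i => siftupA h i) heap) j)) := by
  intro k
  induction k with
  | zero =>
    intro heap _ hj
    simp only [List.range_zero, List.reverse_nil, List.foldl_nil]
    exact ⟨List.Perm.refl _, fun j => hj j (Nat.zero_le _)⟩
  | succ k ih =>
    intro heap hk hj
    simp only [List.range_succ, List.reverse_append, List.reverse_cons, List.reverse_nil,
      List.nil_append, List.cons_append, List.foldl_cons]
    have hklen : k < heap.length := by omega
    obtain ⟨hperm, hheapk, hunch, hlenk⟩ := siftupA_spec heap k hklen (by
      intro i c hdi hc hclen hik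
      obtain ⟨c0, hc0, hdc0⟩ := desc_step hdi hik
      have hc0k : k + 1 ≤ c0 := by rcases hc0 with h | h <;> omega
      exact hj c0 hc0k i c hdc0 hc hclen)
    have hnext : ∀ j, k ≤ j → HeapAt (siftupA heap k) j := by
      intro j hkj
      rcases Nat.eq_or_lt_of_le hkj with h | h
      · subst h; exact hheapk
      · by_cases hdkj : desc k j = true
        · intro i c hdi hc hclen
          exact hheapk i c (desc_trans hdkj hdi) hc hclen
        · have hnd : ∀ i, desc j i = true → desc k i = false := by
            intro i hji
            by_contra hki
            rw [Bool.not_eq_false] at hki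
            rcases desc_tree hki hji with h1 | h1
            · exact hdkj h1
            · have := desc_le h1; omega
          intro i c hdi hc hclen
          rw [hunch i (hnd i hdi), hunch c (hnd c (desc_child hdi hc))]
          rw [hlenk] at hclen
          exact hj j (by omega) i c hdi hc hclen
    obtain ⟨hp2, hh2⟩ := ih (siftupA heap k) (by rw [hlenk]; omega) hnext
    exact ⟨hp2.trans hperm, hh2⟩

theorem heapify_spec (heap : List Int) :
    (heapifyA heap).Perm heap ∧ IsHeap (heapifyA heap) := by
  have hpre : ∀ j, heap.length / 2 ≤ j → HeapAt heap j := by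
    intro j hj i c hdi hc hclen
    exfalso
    have := desc_le hdi
    rcases hc with h | h <;> omega
  obtain ⟨h1, h2⟩ := heapify_aux (heap.length / 2) heap le_rfl hpre
  exact ⟨h1, h2 0⟩

-- ---- the root of a heap is its minimum ----

theorem heap_root_le (h : List Int) (hh : IsHeap h) : ∀ j, j < h.length →
    pyget h 0 ≤ pyget h j := by
  intro j
  induction j using Nat.strong_induction_on with
  | _ j ih =>
    intro hj
    rcases Nat.eq_zero_or_pos j with h0 | h0
    · subst h0; exact le_refl _
    · have hc : isChild ((j - 1) / 2) j := by unfold isChild; omega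
      have h1 := hh ((j - 1) / 2) j (desc_zero _) hc hj
      have h2 := ih ((j - 1) / 2) (by omega) (by omega)
      omega

theorem heap_root_le_mem (h : List Int) (hh : IsHeap h) (x : Int) (hx : x ∈ h) :
    pyget h 0 ≤ x := by
  obtain ⟨j, hj, hje⟩ := List.mem_iff_getElem.mp hx
  rw [← hje, ← pyget_eq_getElem hj]
  exact heap_root_le h hh j hj

theorem heap_head_eq (h : List Int) (x : Int) (t : List Int) (hh : IsHeap h)
    (hp : h.Perm (x :: t)) (hs : List.Pairwise (· ≤ ·) (x :: t)) : pyget h 0 = x := by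
  have hne : 0 < h.length := by rw [hp.length_eq]; simp
  have h0x : pyget h 0 ∈ x :: t := hp.mem_iff.mp (pyget_mem hne)
  have hxh : x ∈ h := hp.mem_iff.mpr (List.mem_cons_self)
  have hle := heap_root_le_mem h hh x hxh
  rcases List.mem_cons.mp h0x with h1 | h1
  · exact h1
  · have := (List.pairwise_cons.mp hs).1 _ h1
    omega

-- ---- heappop / heappush ----

theorem heappop_spec (heap : List Int) (hh : IsHeap heap) (hne : heap ≠ []) :
    (heappopA heap).1 = pyget heap 0 ∧ IsHeap (heappopA heap).2 ∧
    (pyget heap 0 :: (heappopA heap).2).Perm heap := by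
  rw [heappopA]
  by_cases hemp : heap.dropLast.isEmpty
  · rw [if_pos hemp]
    have hl1 : heap.length = 1 := by
      have := List.isEmpty_iff.mp hemp
      have h2 := List.length_dropLast (xs := heap)
      rw [this] at h2
      simp at h2
      have : heap.length ≠ 0 := fun h => hne (List.eq_nil_of_length_eq_zero h)
      omega
    obtain ⟨a, ha⟩ : ∃ a, heap = [a] := by
      cases heap with
      | nil => simp at hl1
      | cons b t =>
        cases t with
        | nil => exact ⟨b, rfl⟩
        | cons c u => exfalso; simp at hl1
    subst ha
    refine ⟨rfl, ?_, by simp⟩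
    intro i c _ hc hcl
    simp at hcl
  · rw [if_neg hemp]
    have hlge : 2 ≤ heap.length := by
      have : ¬ heap.dropLast = [] := fun h => hemp (List.isEmpty_iff.mpr h)
      have h2 : heap.dropLast.length ≠ 0 := fun h => this (List.eq_nil_of_length_eq_zero h)
      rw [List.length_dropLast] at h2
      omega
    have hrl : heap.dropLast.length = heap.length - 1 := List.length_dropLast
    have h0 : pyget heap.dropLast 0 = pyget heap 0 := pyget_dropLast (by omega)
    obtain ⟨sperm, sheap, _, slen⟩ := siftupA_spec
      (heap.dropLast.set 0 (heap.getLastD 0)) 0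
      (by rw [List.length_set]; omega)
      (by
        intro i c hdi hc hclen hip
        rw [List.length_set, hrl] at hclen
        have hcne : c ≠ 0 := by rcases hc with h | h <;> omega
        have hilt : i < c := by rcases hc with h | h <;> omega
        rw [pyget_set_ne (show (0:Nat) ≠ i from fun h => hip h.symm),
          pyget_set_ne (show (0:Nat) ≠ c from fun h => hcne h.symm),
          pyget_dropLast (by omega), pyget_dropLast (by omega)]
        exact hh i c (desc_zero i) hc (by omega))
    refine ⟨h0, sheap, ?_⟩
    have hrest : heap.dropLast ++ [heap.getLastD 0] = heap := by
      have h1 : heap.getLastD 0 = heap.getLast hne := by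
        rw [List.getLastD_eq_getLast?, List.getLast?_eq_getLast hne]
        rfl
      rw [h1]
      exact List.dropLast_append_getLast hne
    rw [← Multiset.coe_eq_coe]
    have hms := mset_set (show 0 < heap.dropLast.length by omega) (heap.getLastD 0)
    rw [h0] at hms
    calc ((pyget heap 0 :: siftupA (heap.dropLast.set 0 (heap.getLastD 0)) 0 : List Int) :
          Multiset Int)
        = (siftupA (heap.dropLast.set 0 (heap.getLastD 0)) 0 : Multiset Int)
            + {pyget heap 0} := coe_cons _ _
      _ = ((heap.dropLast.set 0 (heap.getLastD 0) : List Int) : Multiset Int)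
            + {pyget heap 0} := by rw [Multiset.coe_eq_coe.mpr sperm]
      _ = (heap.dropLast : Multiset Int) + {heap.getLastD 0} := hms
      _ = ((heap.dropLast ++ [heap.getLastD 0] : List Int) : Multiset Int) := by
            rw [← Multiset.coe_add]; rfl
      _ = (heap : Multiset Int) := by rw [hrest]

theorem heappush_spec (heap : List Int) (v : Int) (hh : IsHeap heap) :
    IsHeap (heappushA heap v) ∧ (heappushA heap v).Perm (v :: heap) := by
  rw [heappushA, siftdownA]
  have hpos : (heap ++ [v]).length - 1 = heap.length := by simp
  rw [hpos, pyget_concat]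
  obtain ⟨p1, _, p3⟩ := sdl_spec v 0 heap.length heap.length (heap ++ [v]) le_rfl (by simp) (desc_zero _)
    (by
      intro i c hdi hc hclen hip hcp
      have hilt : i < c := by rcases hc with h | h <;> omega
      simp only [List.length_append, List.length_cons, List.length_nil] at hclen
      have hcl : c < heap.length := by omega
      rw [pyget_append_left (by omega), pyget_append_left hcl]
      exact hh i c hdi hc hcl)
    (by
      intro c hc hclen
      exfalso
      simp only [List.length_append, List.length_cons, List.length_nil] at hclen
      rcases hc with h | h <;> omega)
    (by
      intro _ c hc hclen
      exfalso
      simp only [List.length_append, List.length_cons, List.length_nil] at hclen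
      rcases hc with h | h <;> omega)
  refine ⟨p3, ?_⟩
  have hset : (heap ++ [v]).set heap.length v = heap ++ [v] := by
    have hs := set_pyget_self (h := heap ++ [v]) (i := heap.length)
      (by simp only [List.length_append, List.length_cons, List.length_nil]; omega)
    rwa [pyget_concat] at hs
  rw [hset] at p1
  exact p1.trans (List.perm_append_singleton v heap)

-- ---- proof-side canonical loop: the mix loop on a list kept sorted ----

def insortRight (xs : List Int) (v : Int) : List Int :=
  xs.take (PySem.List.bisectRight xs v) ++ v :: xs.drop (PySem.List.bisectRight xs v)

theorem len_insortRight (xs : List Int) (v : Int) :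
    (insortRight xs v).length = xs.length + 1 := by
  simp only [insortRight, List.length_append, List.length_cons, List.length_take,
    List.length_drop]
  omega

def loopC (K : Int) (xs : List Int) (count : Int) : Int :=
  if hc : xs ≠ [] ∧ pyget xs 0 < K then
    if hl : xs.length = 1 then -1
    else loopC K (insortRight (xs.drop 2) (pyget xs 0 + 2 * pyget xs 1)) (count + 1)
  else count
termination_by xs.length
decreasing_by
  simp only [len_insortRight, List.length_drop]
  have h0 : xs.length ≠ 0 := fun h => hc.1 (List.eq_nil_of_length_eq_zero h)
  omega

theorem insort_perm (xs : List Int) (v : Int) : (insortRight xs v).Perm (v :: xs) := by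
  rw [insortRight]
  refine List.perm_middle.trans ?_
  rw [List.take_append_drop]

theorem insort_sorted {xs : List Int} (hs : List.Pairwise (· ≤ ·) xs) (v : Int) :
    List.Pairwise (· ≤ ·) (insortRight xs v) := by
  obtain ⟨hle, hbefore, hafter⟩ := PySem.List.bisectRight_spec xs v hs
  rw [insortRight]
  rw [List.pairwise_append]
  refine ⟨hs.sublist (List.take_sublist _ _), ?_, ?_⟩
  · rw [List.pairwise_cons]
    refine ⟨?_, hs.sublist (List.drop_sublist _ _)⟩
    intro y hy
    obtain ⟨j, hj, hje⟩ := List.mem_iff_getElem.mp hy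
    rw [List.getElem_drop] at hje
    have := hafter (PySem.List.bisectRight xs v + j) (by
      rw [List.length_drop] at hj; omega) (by omega)
    rw [hje] at this
    omega
  · intro a ha b hb
    obtain ⟨j, hj, hje⟩ := List.mem_iff_getElem.mp ha
    rw [List.getElem_take] at hje
    have hjlt : j < PySem.List.bisectRight xs v := by
      rw [List.length_take] at hj; omega
    have hav : a ≤ v := by
      have := hbefore j (by rw [List.length_take] at hj; omega) hjlt
      rw [hje] at this; exact this
    rcases List.mem_cons.mp hb with h1 | h1
    · omega
    · obtain ⟨j2, hj2, hje2⟩ := List.mem_iff_getElem.mp h1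
      rw [List.getElem_drop] at hje2
      have := hafter (PySem.List.bisectRight xs v + j2) (by
        rw [List.length_drop] at hj2; omega) (by omega)
      rw [hje2] at this
      omega

-- ---- A's loop equals the canonical loop ----

theorem loopA_eq_loopC : ∀ (n : Nat) (h xs : List Int) (K ans : Int),
    h.length ≤ n → h ≠ [] → IsHeap h → h.Perm xs → List.Pairwise (· ≤ ·) xs →
    loopA K n h ans = loopC K xs ans := by
  intro n
  induction n with
  | zero =>
    intro h xs K ans hn hne _ _ _
    exact absurd (List.eq_nil_of_length_eq_zero (Nat.le_zero.mp hn)) hne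
  | succ n ih =>
    intro h xs K ans hn hne hh hp hs
    cases xs with
    | nil => exact absurd hp.eq_nil hne
    | cons x t =>
      have hx0 : pyget h 0 = x := heap_head_eq h x t hh hp hs
      have hlen : h.length = t.length + 1 := by rw [hp.length_eq]; simp
      rw [loopA, loopC]
      by_cases hK : x < K
      · by_cases h1 : h.length ≤ 1
        · have ht : t = [] := List.eq_nil_of_length_eq_zero (by omega)
          subst ht
          rw [if_pos ⟨h1, by rw [hx0]; exact hK⟩,
            dif_pos ⟨List.cons_ne_nil x [], by simpa using hK⟩, dif_pos (by simp)]
        · rw [if_neg (fun hcon => h1 hcon.1), if_neg (by rw [hx0]; omega),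
            dif_pos ⟨List.cons_ne_nil x t, by simpa using hK⟩,
            dif_neg (by simp only [List.length_cons]; omega)]
          cases t with
          | nil => simp at hlen; omega
          | cons y t2 =>
            obtain ⟨q1, q2, q3⟩ := heappop_spec h hh hne
            have hperm1 : (heappopA h).2.Perm (y :: t2) := by
              have hq : (pyget h 0 :: (heappopA h).2).Perm (x :: y :: t2) := q3.trans hp
              rw [hx0] at hq
              exact hq.cons_inv
            have hne1 : (heappopA h).2 ≠ [] := by
              intro hnil
              have := hperm1.length_eq
              rw [hnil] at this
              simp at this
            obtain ⟨r1, r2, r3⟩ := heappop_spec (heappopA h).2 q2 hne1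
            have hy : pyget (heappopA h).2 0 = y :=
              heap_head_eq _ y t2 q2 hperm1 hs.of_cons
            have hperm2 : (heappopA (heappopA h).2).2.Perm t2 := by
              have hr : (pyget (heappopA h).2 0 :: (heappopA (heappopA h).2).2).Perm
                  (y :: t2) := r3.trans hperm1
              rw [hy] at hr
              exact hr.cons_inv
            obtain ⟨s1, s2⟩ := heappush_spec (heappopA (heappopA h).2).2
              ((heappopA h).1 + (heappopA (heappopA h).2).1 * 2) r2
            have hBt : insortRight ((x :: y :: t2).drop 2)
                (pyget (x :: y :: t2) 0 + 2 * pyget (x :: y :: t2) 1) =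
                insortRight t2 (x + 2 * y) := rfl
            rw [hBt]
            have hv : (heappopA h).1 + (heappopA (heappopA h).2).1 * 2 = x + 2 * y := by
              rw [q1, hx0, r1, hy]; ring
            apply ih
            · rw [len_heappushA, len_heappopA, len_heappopA]
              omega
            · intro hnil
              have := s2.length_eq
              rw [hnil] at this
              simp at this
            · exact s1
            · refine s2.trans ?_
              rw [hv]
              refine (List.Perm.cons _ hperm2).trans ?_
              exact (insort_perm t2 (x + 2 * y)).symm
            · exact insort_sorted hs.of_cons.of_cons (x + 2 * y)
      · rw [if_neg (fun hcon => hK (hx0 ▸ hcon.2)),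
          if_pos (show K ≤ pyget h 0 by rw [hx0]; omega),
          dif_neg (fun hcon => hK (by simpa using hcon.2))]

-- ---- B's scan computes the first two elements of the sorted pool ----

theorem step_top2 (l : List Int) (hs : List.Pairwise (· ≤ ·) l) (v : Int) :
    scanStep (l.head?, l.tail.head?) v =
      ((List.orderedInsert (· ≤ ·) v l).head?, (List.orderedInsert (· ≤ ·) v l).tail.head?) := by
  match l with
  | [] => rfl
  | [a] =>
    rcases lt_trichotomy v a with h | h | h
    · simp [scanStep, h, le_of_lt h]
    · subst h
      simp [scanStep]
    · simp [scanStep, show ¬ v < a by omega, show ¬ v ≤ a by omega]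
  | a :: b :: t =>
    have hab : a ≤ b := (List.pairwise_cons.mp hs).1 b (by simp)
    rcases lt_trichotomy v a with h | h | h
    · simp [scanStep, h, le_of_lt h]
    · subst h
      rcases eq_or_lt_of_le hab with hb | hb
      · subst hb
        simp [scanStep]
      · simp [scanStep, hb]
    · rcases lt_trichotomy v b with hb | hb | hb
      · simp [scanStep, show ¬ v < a by omega, show ¬ v ≤ a by omega, hb, le_of_lt hb]
      · subst hb
        simp [scanStep, show ¬ v < a by omega, show ¬ v ≤ a by omega]
      · simp [scanStep, show ¬ v < a by omega, show ¬ v ≤ a by omega,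
          show ¬ v < b by omega, show ¬ v ≤ b by omega]

theorem fold_top2 : ∀ (p l : List Int), List.Pairwise (· ≤ ·) l →
    p.foldl scanStep (l.head?, l.tail.head?) =
      ((p.foldl (fun acc v => List.orderedInsert (· ≤ ·) v acc) l).head?,
       (p.foldl (fun acc v => List.orderedInsert (· ≤ ·) v acc) l).tail.head?) := by
  intro p
  induction p with
  | nil => intro l _; rfl
  | cons v p ih =>
    intro l hs
    rw [List.foldl_cons, List.foldl_cons, step_top2 l hs v]
    exact ih _ (hs.orderedInsert v l)

theorem fold_ins_perm : ∀ (p l : List Int),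
    (p.foldl (fun acc v => List.orderedInsert (· ≤ ·) v acc) l).Perm (l ++ p) := by
  intro p
  induction p with
  | nil => intro l; simp
  | cons v p ih =>
    intro l
    rw [List.foldl_cons]
    refine (ih _).trans ?_
    refine ((List.perm_orderedInsert _ v l).append_right p).trans ?_
    exact List.perm_middle.symm

theorem fold_ins_sorted : ∀ (p l : List Int), List.Pairwise (· ≤ ·) l →
    List.Pairwise (· ≤ ·) (p.foldl (fun acc v => List.orderedInsert (· ≤ ·) v acc) l) := by
  intro p
  induction p with
  | nil => intro l hs; exact hs
  | cons v p ih =>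
    intro l hs
    rw [List.foldl_cons]
    exact ih _ (hs.orderedInsert v l)

theorem scan2_spec (pool l : List Int) (hp : pool.Perm l)
    (hs : List.Pairwise (· ≤ ·) l) :
    scan2 pool = (l.head?, l.tail.head?) := by
  have h0 : scan2 pool = pool.foldl scanStep (([] : List Int).head?, ([] : List Int).tail.head?) := rfl
  rw [h0, fold_top2 pool [] (by simp)]
  have hperm : (pool.foldl (fun acc v => List.orderedInsert (· ≤ ·) v acc) []).Perm l := by
    refine (fold_ins_perm pool []).trans ?_
    simpa using hp
  have hsorted := fold_ins_sorted pool [] (by simp)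
  have : pool.foldl (fun acc v => List.orderedInsert (· ≤ ·) v acc) [] = l :=
    List.Perm.eq_of_pairwise' hsorted hs hperm
  rw [this]

-- ---- B's loop equals the canonical loop ----

theorem loopB_eq_loopC : ∀ (n : Nat) (pool l : List Int) (K ans : Int),
    pool.length ≤ n → pool ≠ [] → pool.Perm l → List.Pairwise (· ≤ ·) l →
    loopB K n pool ans = loopC K l ans := by
  intro n
  induction n with
  | zero =>
    intro pool l K ans hn hne _ _
    exact absurd (List.eq_nil_of_length_eq_zero (Nat.le_zero.mp hn)) hne
  | succ n ih =>
    intro pool l K ans hn hne hp hs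
    cases l with
    | nil => exact absurd hp.eq_nil hne
    | cons x t =>
      have hscan : scan2 pool = (some x, t.head?) := scan2_spec pool (x :: t) hp hs
      cases t with
      | nil =>
        rw [loopB, hscan]
        show (if K ≤ x then ans else -1) = loopC K [x] ans
        rw [loopC]
        by_cases hK : K ≤ x
        · rw [if_pos hK, dif_neg (fun hcon => by simp at hcon; omega)]
        · rw [if_neg hK, dif_pos ⟨List.cons_ne_nil x [], by simpa using (by omega : x < K)⟩,
            dif_pos (by simp)]
      | cons y t2 =>
        rw [loopB, hscan]
        show (if K ≤ x then ans
              else loopB K n (((pool.erase x).erase y) ++ [x + 2 * y]) (ans + 1)) =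
          loopC K (x :: y :: t2) ans
        rw [loopC]
        by_cases hK : K ≤ x
        · rw [if_pos hK, dif_neg (fun hcon => by simp at hcon; omega)]
        · rw [if_neg hK,
            dif_pos ⟨List.cons_ne_nil x (y :: t2), by simpa using (by omega : x < K)⟩,
            dif_neg (by simp)]
          have hCt : insortRight ((x :: y :: t2).drop 2)
              (pyget (x :: y :: t2) 0 + 2 * pyget (x :: y :: t2) 1) =
              insortRight t2 (x + 2 * y) := rfl
          rw [hCt]
          have hb_mem : x ∈ pool := hp.mem_iff.mpr (by simp)
          have he1 : (pool.erase x).Perm (y :: t2) := by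
            have := hp.erase x
            rwa [List.erase_cons_head] at this
          have he2 : ((pool.erase x).erase y).Perm t2 := by
            have := he1.erase y
            rwa [List.erase_cons_head] at this
          have hperm' : (((pool.erase x).erase y) ++ [x + 2 * y]).Perm
              (insortRight t2 (x + 2 * y)) := by
            refine (List.perm_append_singleton _ _).trans ?_
            refine (List.Perm.cons _ he2).trans ?_
            exact (insort_perm t2 (x + 2 * y)).symm
          apply ih
          · have l1 : (pool.erase x).length = pool.length - 1 :=
              List.length_erase_of_mem hb_mem
            have hy_mem : y ∈ pool.erase x := he1.mem_iff.mpr (by simp)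
            have l2 : ((pool.erase x).erase y).length = (pool.erase x).length - 1 :=
              List.length_erase_of_mem hy_mem
            have hplen : pool.length = t2.length + 2 := by
              have := hp.length_eq; simp at this; omega
            simp only [List.length_append, l2, l1, List.length_cons, List.length_nil]
            omega
          · simp
          · exact hperm'
          · exact insort_sorted hs.of_cons.of_cons (x + 2 * y)

-- ===== VERDICT (by name: the statement is the Claim_ definition above) =====
theorem solution_spec : Claim_equal_solution := by
  intro s K _ hpre
  show solution s K = solution_alt s K
  rw [solution, solution_alt]
  obtain ⟨hperm, hheap⟩ := heapify_spec s
  have hsp : (PySem.List.sorted s (fun x => x) false).Pairwise (· ≤ ·) := by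
    have := PySem.List.sorted_pairwise s (fun x => x)
    simpa using this
  have hsperm : s.Perm (PySem.List.sorted s (fun x => x) false) :=
    (PySem.List.sorted_perm s (fun x => x) false).symm
  have hslen : (heapifyA s).length = s.length := hperm.length_eq
  rw [loopA_eq_loopC s.length _ _ K 0 (le_of_eq hslen)
      (by
        intro hnil
        apply hpre
        have : s.length = 0 := by rw [← hslen, hnil]; rfl
        exact List.eq_nil_of_length_eq_zero this)
      hheap (hperm.trans hsperm) hsp]
  exact (loopB_eq_loopC s.length s _ K 0 le_rfl hpre hsperm hsp).symm
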